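-- pv_equiv track=rewrite | github.com/axieax/planner | new_algo.py | plan_stats
-- ===== SOURCE A (Python) =====
-- def plan_stats(plan):
--     ''' Returns a dictionary of stats related to the plan '''
--     # find finishing term - first term from end that is non-empty
--     finish_index = len(plan) - 1
--     while not plan[finish_index]:
--         finish_index -= 1
--     # find starting term and study duration
--     total_study_terms = 0
--     start_index = finish_index
--     for term_index, term_courses in enumerate(plan[:finish_index + 1]):
--         if term_courses:
--             start_index = min(start_index, term_index)
--             total_study_terms += 1
--
--     return {
--         'start_index': start_index,
--         'finish_index': finish_index,
--         'total_study_terms': total_study_terms,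
--         'total_duration': finish_index - start_index + 1,
--     }
-- ===== SOURCE B (Python) =====
-- def plan_stats(plan):
--     ''' Returns a dictionary of stats related to the plan '''
--     idx = [i for i, term in enumerate(plan) if term]
--     return {
--         'start_index': idx[0],
--         'finish_index': idx[-1],
--         'total_study_terms': len(idx),
--         'total_duration': idx[-1] - idx[0] + 1,
--     }
-- ===== Notes on version B (the rewrite author's own statement) =====
-- stated objective: simpler
-- what changed: Replaces the unbounded backward while-scan plus a guarded forward min/count accumulation with one forward pass that collects the indices of non-empty terms and reads all four stats off that index list.
import Mathlib
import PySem

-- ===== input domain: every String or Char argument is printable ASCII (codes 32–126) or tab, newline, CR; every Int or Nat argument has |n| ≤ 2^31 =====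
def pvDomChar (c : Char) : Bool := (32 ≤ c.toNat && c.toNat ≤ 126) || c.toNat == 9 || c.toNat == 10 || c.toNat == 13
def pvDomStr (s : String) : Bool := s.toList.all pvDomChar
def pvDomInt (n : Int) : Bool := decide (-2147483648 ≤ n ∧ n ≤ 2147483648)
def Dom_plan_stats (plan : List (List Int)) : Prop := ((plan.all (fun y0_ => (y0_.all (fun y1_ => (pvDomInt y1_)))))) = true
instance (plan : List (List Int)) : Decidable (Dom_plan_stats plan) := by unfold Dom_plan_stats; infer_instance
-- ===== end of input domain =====

-- B replaces A's backward while-scan plus guarded forward min/count accumulation with one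
-- forward pass collecting the indices of non-empty terms (objective: simpler).

-- ===== PORT A =====
-- 'while not plan[finish_index]: finish_index -= 1' — the index may go negative
-- (Python wraparound via pyGet?); fuel 2*len+2 covers every step the Python loop can
-- take before it either stops or raises IndexError (pyGet? = none, excluded by Pre_).
def planScanA (plan : List (List Int)) : Int → Nat → Option Int
  | _, 0 => none
  | i, fuel+1 =>
    match PySem.List.pyGet? plan i with
    | none => none  -- IndexError
    | some t => if t.isEmpty then planScanA plan (i-1) fuel else some i

def plan_stats (plan : List (List Int)) : List (String × Int) :=
  match planScanA plan ((plan.length : Int) - 1) (2 * plan.length + 2) with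
  | none => []  -- IndexError raised by the while loop; excluded by Pre_
  | some fi =>
    let res := (PySem.List.enumerate (PySem.List.slice plan none (some (fi + 1))) 0).foldl
      (fun acc p => if p.2.isEmpty then acc else (min acc.1 p.1, acc.2 + 1))
      ((fi, 0) : Int × Int)
    [("start_index", res.1), ("finish_index", fi),
     ("total_study_terms", res.2), ("total_duration", fi - res.1 + 1)]

-- ===== PORT B =====
def plan_stats_alt (plan : List (List Int)) : List (String × Int) :=
  let idx := ((PySem.List.enumerate plan 0).filter (fun p => ¬ p.2.isEmpty)).map (fun p => p.1)
  match PySem.List.pyGet? idx 0, PySem.List.pyGet? idx (-1) with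
  | some s, some f =>
    [("start_index", s), ("finish_index", f),
     ("total_study_terms", (idx.length : Int)), ("total_duration", f - s + 1)]
  | _, _ => []  -- idx[0] raises IndexError on an all-empty plan; excluded by Pre_

-- ===== PRECONDITION & SPEC =====
-- Pre_ excludes the plans with no non-empty term (including the empty plan), on which both
-- A's while loop and B's idx[0] raise IndexError.
def Pre_plan_stats (plan : List (List Int)) : Prop := ∃ t ∈ plan, t ≠ []
instance (plan : List (List Int)) : Decidable (Pre_plan_stats plan) := by
  unfold Pre_plan_stats; infer_instance
def pvWitness_plan_stats : List (List Int) := [[], [1, 2], [], [3]]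

def Spec_plan_stats (plan : List (List Int)) (out : List (String × Int)) : Prop := out = plan_stats_alt plan
instance (plan : List (List Int)) (out : List (String × Int)) : Decidable (Spec_plan_stats plan out) := by unfold Spec_plan_stats; infer_instance

-- ===== CLAIM (what is proved, stated in full; the proofs are below) =====
def Claim_equal_plan_stats : Prop := ∀ (plan : List (List Int)), Dom_plan_stats plan → Pre_plan_stats plan → Spec_plan_stats plan (plan_stats plan)

-- ===== LEMMAS AND PROOFS =====

-- indices ≤ n carrying a non-empty term
def idxLE (plan : List (List Int)) (n : Nat) : List Nat :=
  (List.range (n + 1)).filter (fun j => plan[j]?.getD [] ≠ [])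

theorem idxLE_succ (plan : List (List Int)) (n : Nat) :
    idxLE plan (n + 1) =
      idxLE plan n ++ (if plan[n + 1]?.getD [] = [] then [] else [n + 1]) := by
  unfold idxLE
  rw [List.range_succ, List.filter_append]
  by_cases h : plan[n + 1]?.getD [] = [] <;> simp [h]

theorem idxLE_pairwise (plan : List (List Int)) (n : Nat) :
    (idxLE plan n).Pairwise (· < ·) :=
  List.Pairwise.filter _ (List.pairwise_lt_range)

theorem mem_idxLE (plan : List (List Int)) (n j : Nat) :
    j ∈ idxLE plan n ↔ j < n + 1 ∧ plan[j]?.getD [] ≠ [] := by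
  simp [idxLE, List.mem_filter]

theorem le_of_getLast?_pairwise {l : List Nat} {m : Nat}
    (hp : l.Pairwise (· < ·)) (hl : l.getLast? = some m) : ∀ x ∈ l, x ≤ m := by
  rcases List.getLast?_eq_some_iff.mp hl with ⟨l', rfl⟩
  intro x hx
  rcases List.mem_append.mp hx with h | h
  · exact le_of_lt ((List.pairwise_append.mp hp).2.2 x h m (by simp))
  · simp_all

-- the backward while-scan returns the greatest non-empty index ≤ n
theorem planScanA_eq (plan : List (List Int)) (n : Nat) (fuel : Nat)
    (hn : n < plan.length) (hf : n + 1 ≤ fuel) (hne : idxLE plan n ≠ []) :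
    planScanA plan (n : Int) fuel = ((idxLE plan n).getLast?).map (fun k : Nat => (k : Int)) := by
  induction n generalizing fuel with
  | zero =>
    obtain ⟨fuel', rfl⟩ : ∃ f', fuel = f' + 1 := ⟨fuel - 1, by omega⟩
    have h0 : plan[0]?.getD [] ≠ [] := by
      intro h
      exact hne (by simp [idxLE, h])
    have hidx : idxLE plan 0 = [0] := by simp [idxLE, h0]
    have hget : PySem.List.pyGet? plan ((0 : Nat) : Int) = some (plan[0]?.getD []) := by
      rw [PySem.List.pyGet?_natCast plan 0]
      simp [List.getElem?_eq_getElem hn]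
    simp only [Nat.cast_zero] at hget ⊢
    simp [planScanA, hget, h0, hidx]
  | succ n ih =>
    obtain ⟨fuel', rfl⟩ : ∃ f', fuel = f' + 1 := ⟨fuel - 1, by omega⟩
    have hget : PySem.List.pyGet? plan ((n + 1 : Nat) : Int) = some (plan[n + 1]?.getD []) := by
      rw [PySem.List.pyGet?_natCast plan (n + 1)]
      simp [List.getElem?_eq_getElem hn]
    by_cases he : plan[n + 1]?.getD [] = [] 
    · have hstep : idxLE plan (n + 1) = idxLE plan n := by simp [idxLE_succ, he]
      have hne' : idxLE plan n ≠ [] := by rw [hstep] at hne; exact hne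
      have hcast : ((n + 1 : Nat) : Int) - 1 = ((n : Nat) : Int) := by push_cast; ring
      simp only [planScanA, hget, he, List.isEmpty_nil]
      rw [hcast, hstep]
      exact ih fuel' (by omega) (by omega) hne'
    · have hstep : idxLE plan (n + 1) = idxLE plan n ++ [n + 1] := by simp [idxLE_succ, he]
      have hget' : PySem.List.pyGet? plan ((n : Int) + 1) = some (plan[n + 1]?.getD []) := by
        push_cast at hget; exact hget
      simp [planScanA, hget', he, hstep]

theorem foldl_min_of_le {l : List Int} {a : Int} (h : ∀ x ∈ l, a ≤ x) :
    l.foldl min a = a := by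
  induction l generalizing a with
  | nil => rfl
  | cons x t ih =>
    simp only [List.foldl_cons]
    rw [min_eq_left (h x (by simp))]
    exact ih (fun y hy => h y (by simp [hy]))

-- the A-loop fold, characterised over an arbitrary enumerated list
theorem foldA_char (l : List (Int × List Int)) (s t : Int) :
    l.foldl (fun acc p => if p.2 = [] then acc else (min acc.1 p.1, acc.2 + 1)) (s, t) =
      (((l.filter (fun p => p.2 ≠ [])).map (fun p => p.1)).foldl min s,
       t + ((l.filter (fun p => p.2 ≠ [])).length : Int)) := by
  induction l generalizing s t with
  | nil => simp
  | cons x xs ih =>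
    by_cases hx : x.2 = []
    · simp [hx, ih]
    · simp only [List.foldl_cons, if_neg hx]
      rw [ih]
      simp [hx]
      ring

-- B's idx list equals idxLE, mapped to Int
theorem idxI_eq (plan : List (List Int)) :
    ((PySem.List.enumerate plan 0).filter (fun p => ¬ p.2.isEmpty)).map (fun p => p.1) =
      ((List.range plan.length).filter (fun j => plan[j]?.getD [] ≠ [])).map
        (fun k : Nat => (k : Int)) := by
  rw [PySem.List.enumerate_eq_map_pyRange plan [], PySem.List.len_eq,
    PySem.List.pyRange_zero_nat]
  simp [List.filter_map, List.map_map, Function.comp_def, List.getD_eq_getElem?_getD]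

-- ===== VERDICT (by name: the statement is the Claim_ definition above) =====
theorem plan_stats_spec : Claim_equal_plan_stats := by
  intro plan _ hpre
  unfold Spec_plan_stats
  obtain ⟨t, ht, htne⟩ := hpre
  obtain ⟨j, hjlt, rfl⟩ := List.getElem_of_mem ht
  have hlen : 0 < plan.length := by omega
  have hjL : j ∈ idxLE plan (plan.length - 1) := by
    rw [mem_idxLE]
    refine ⟨by omega, ?_⟩
    rw [List.getElem?_eq_getElem hjlt]
    exact htne
  have hneL : idxLE plan (plan.length - 1) ≠ [] := fun h => by simp [h] at hjL
  obtain ⟨m, hm⟩ : ∃ m, (idxLE plan (plan.length - 1)).getLast? = some m := by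
    cases hLl : (idxLE plan (plan.length - 1)).getLast? with
    | none => exact absurd (List.getLast?_eq_none_iff.mp hLl) hneL
    | some m => exact ⟨m, rfl⟩
  have hmem : m ∈ idxLE plan (plan.length - 1) := List.mem_of_getLast? hm
  have hpw : (idxLE plan (plan.length - 1)).Pairwise (· < ·) := idxLE_pairwise plan _
  have hmax : ∀ x ∈ idxLE plan (plan.length - 1), x ≤ m := le_of_getLast?_pairwise hpw hm
  have hmlt : m < plan.length := by
    have := (mem_idxLE plan _ m).mp hmem; omega
  have hemp : ∀ k, m < k → plan[k]?.getD [] = [] := by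
    intro k hk
    by_cases hkl : k < plan.length
    · by_contra hne2
      have hkL : k ∈ idxLE plan (plan.length - 1) := (mem_idxLE plan _ k).mpr ⟨by omega, hne2⟩
      exact absurd (hmax k hkL) (by omega)
    · rw [List.getElem?_eq_none (by omega)]; rfl
  have hstab : ∀ d, idxLE plan (m + d) = idxLE plan m := by
    intro d
    induction d with
    | zero => rfl
    | succ d ih =>
      rw [show m + (d + 1) = (m + d) + 1 by ring, idxLE_succ,
        if_pos (hemp _ (by omega)), List.append_nil, ih]
  have hLm : idxLE plan m = idxLE plan (plan.length - 1) := by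
    rw [show plan.length - 1 = m + (plan.length - 1 - m) by omega, hstab]
  -- the backward scan of A yields m
  have hscan : planScanA plan ((plan.length : Int) - 1) (2 * plan.length + 2)
      = some (m : Int) := by
    rw [show ((plan.length : Int) - 1) = ((plan.length - 1 : Nat) : Int) by
      rw [Nat.cast_sub hlen]; simp]
    rw [planScanA_eq plan _ _ (by omega) (by omega) hneL, hm]
    rfl
  -- B's index list is idxLE plan (plan.length - 1), cast to Int
  have hidxB : ((PySem.List.enumerate plan 0).filter (fun p => ¬ p.2.isEmpty)).map
        (fun p => p.1) =
      (idxLE plan (plan.length - 1)).map (fun k : Nat => (k : Int)) := by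
    rw [idxI_eq]
    unfold idxLE
    rw [show plan.length - 1 + 1 = plan.length by omega]
  -- A's slice is take (m + 1), and its index list is the same list
  have hslice : PySem.List.slice plan none (some ((m : Int) + 1)) = plan.take (m + 1) := by
    rw [PySem.List.slice_to plan (show (0 : Int) ≤ (m : Int) + 1 by omega)]
    norm_num
  have hidxA : ((PySem.List.enumerate (plan.take (m + 1)) 0).filter
        (fun p => ¬ p.2.isEmpty)).map (fun p => p.1) =
      (idxLE plan (plan.length - 1)).map (fun k : Nat => (k : Int)) := by
    rw [idxI_eq, List.length_take, min_eq_left (by omega), ← hLm]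
    unfold idxLE
    refine congrArg (List.map _) (List.filter_congr ?_)
    intro k hk
    rw [List.mem_range] at hk
    rw [List.getElem?_take, if_pos hk]
  -- destructure the index list
  obtain ⟨a, L', hLc⟩ : ∃ a L', idxLE plan (plan.length - 1) = a :: L' := by
    cases hc : idxLE plan (plan.length - 1) with
    | nil => exact absurd hc hneL
    | cons a L' => exact ⟨a, L', rfl⟩
  have ha_le : ∀ x ∈ L', a ≤ x := by
    intro x hx
    exact le_of_lt ((List.pairwise_cons.mp (hLc ▸ hpw)).1 x hx)
  have ham : a ≤ m := hmax a (by rw [hLc]; simp)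
  -- A's forward fold returns (a, number of study terms)
  have hmin : ((a :: L').map (fun k : Nat => (k : Int))).foldl min ((m : Int)) = (a : Int) := by
    simp only [List.map_cons, List.foldl_cons]
    rw [min_eq_right (by exact_mod_cast ham)]
    apply foldl_min_of_le
    intro x hx
    obtain ⟨k, hk, rfl⟩ := List.mem_map.mp hx
    exact_mod_cast ha_le k hk
  -- evaluate both ports
  rw [plan_stats, plan_stats_alt, hscan]
  simp only [hidxB, hslice, hLc, List.map_cons]
  rw [PySem.List.pyGet?_zero, PySem.List.pyGet?_neg_one]
  have hlast : (((a : Int) :: L'.map (fun k : Nat => (k : Int)))).getLast? = some ((m : Int)) := by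
    rw [show ((a : Int) :: L'.map (fun k : Nat => (k : Int))) = (a :: L').map (fun k : Nat => (k : Int)) by
      simp, List.getLast?_map, ← hLc, hm]
    rfl
  simp only [hlast, List.getElem?_cons_zero]
  -- reduce A's fold via foldA_char
  have hpred : ((PySem.List.enumerate (plan.take (m + 1)) 0).filter (fun p => p.2 ≠ [])) =
      ((PySem.List.enumerate (plan.take (m + 1)) 0).filter (fun p => ¬ p.2.isEmpty)) := by
    apply List.filter_congr
    intro p _
    simp [List.isEmpty_iff]
  have hlen2 : ((PySem.List.enumerate (plan.take (m + 1)) 0).filter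
      (fun p => ¬ p.2.isEmpty)).length = (a :: L').length := by
    have h := congrArg List.length hidxA
    simp only [List.length_map] at h
    rw [h, hLc]
  have hfold : (PySem.List.enumerate (plan.take (m + 1)) 0).foldl
      (fun acc p => if p.2.isEmpty then acc else (min acc.1 p.1, acc.2 + 1))
      (((m : Int), 0) : Int × Int) =
      ((a : Int), ((a :: L').length : Int)) := by
    have h1 : (PySem.List.enumerate (plan.take (m + 1)) 0).foldl
        (fun acc p => if p.2.isEmpty then acc else (min acc.1 p.1, acc.2 + 1))
        (((m : Int), 0) : Int × Int) =
        (PySem.List.enumerate (plan.take (m + 1)) 0).foldl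
        (fun acc p => if p.2 = [] then acc else (min acc.1 p.1, acc.2 + 1))
        (((m : Int), 0) : Int × Int) := by
      apply List.foldl_ext
      intro acc p _
      simp [List.isEmpty_iff]
    rw [h1, foldA_char, hpred, hlen2]
    rw [hidxA, hLc, hmin]
    simp
  rw [hfold]
  simp
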